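-- pv_equiv track=rewrite | github.com/querypie/querypie-docs | confluence-mdx/bin/reverse_sync/visible_segments.py | _is_figure_only_continuation_lines
-- ===== SOURCE A (Python) =====
-- from typing import Any, Iterable, List, Literal, Tuple
--
-- def _is_figure_only_continuation_lines(lines: Tuple[str, ...]) -> bool:
--     in_figure = False
--     in_figcaption = False
--     saw_figure = False
--
--     for line in lines:
--         stripped = line.strip()
--         if not stripped:
--             continue
--         if stripped.startswith("<figure"):
--             in_figure = True
--             saw_figure = True
--             continue
--         if stripped.startswith("<img") and in_figure:
--             continue
--         if stripped == "<figcaption>" and in_figure: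
--             in_figcaption = True
--             continue
--         if stripped == "</figcaption>" and in_figcaption:
--             in_figcaption = False
--             continue
--         if stripped == "</figure>" and in_figure and not in_figcaption:
--             in_figure = False
--             continue
--         if in_figcaption:
--             continue
--         return False
--
--     return saw_figure and not in_figure and not in_figcaption
-- ===== SOURCE B (Python) =====
-- def _is_figure_only_continuation_lines(lines):
--     toks = [line.strip() for line in lines]
--     n = len(toks)
--
--     def parse_figcaption(i):
--         # scan for the closing tag; everything inside a figcaption is swallowed
--         while i < n:
--             if toks[i] == "</figcaption>":
--                 return i + 1
--             i += 1
--         return None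
--
--     def parse_figure_body(i):
--         # body of a figure: blanks, img lines, further figure-open lines, figcaptions
--         while i < n:
--             t = toks[i]
--             if not t or t.startswith("<img") or t.startswith("<figure"):
--                 i += 1
--             elif t == "<figcaption>":
--                 i = parse_figcaption(i + 1)
--                 if i is None:
--                     return None
--             elif t == "</figure>":
--                 return i + 1
--             else:
--                 return None
--         return None
--
--     saw_figure = False
--     i = 0
--     while i < n:
--         t = toks[i]
--         if not t:
--             i += 1
--         elif t.startswith("<figure"):
--             i = parse_figure_body(i + 1)
--             if i is None:
--                 return False
--             saw_figure = True
--         else: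
--             return False
--     return saw_figure
-- ===== Notes on version B (the rewrite author's own statement) =====
-- stated objective: alternative
-- what changed: Replaces the two-boolean-flag FSM loop with a recursive-descent parser over an index: a top-level loop skips blanks and dispatches each figure to parse_figure_body, which consumes blanks/img/figure-open lines and delegates figcaption blocks to parse_figcaption, which swallows everything up to the closing tag.
import Mathlib
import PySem

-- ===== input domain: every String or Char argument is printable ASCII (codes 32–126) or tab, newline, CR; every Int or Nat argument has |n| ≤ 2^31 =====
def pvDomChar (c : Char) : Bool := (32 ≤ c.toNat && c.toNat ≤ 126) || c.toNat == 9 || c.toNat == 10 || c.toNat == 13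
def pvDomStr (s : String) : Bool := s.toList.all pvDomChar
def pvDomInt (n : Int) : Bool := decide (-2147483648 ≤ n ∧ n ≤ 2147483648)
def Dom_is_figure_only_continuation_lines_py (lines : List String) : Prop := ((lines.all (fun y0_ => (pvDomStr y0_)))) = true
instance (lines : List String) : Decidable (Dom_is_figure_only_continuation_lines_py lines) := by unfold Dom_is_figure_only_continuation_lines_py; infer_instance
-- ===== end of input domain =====

-- B replaces A's single loop over two boolean state flags by a recursive-descent parser
-- (top level / figure body / figcaption routine) of the same cost; return values are identical.

-- ===== PORT A =====
-- literal port of A's flag loop; state = (in_figure, in_figcaption, saw_figure)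
def aLoop : List String → Bool → Bool → Bool → Bool
  | [], inF, inC, saw => saw && !inF && !inC
  | line :: rest, inF, inC, saw =>
    let s := PySem.Str.strip line
    if s = "" then aLoop rest inF inC saw
    else if PySem.Str.startswith s "<figure" then aLoop rest true inC true
    else if PySem.Str.startswith s "<img" && inF then aLoop rest inF inC saw
    else if (s == "<figcaption>") && inF then aLoop rest inF true saw
    else if (s == "</figcaption>") && inC then aLoop rest inF false saw
    else if (s == "</figure>") && inF && !inC then aLoop rest false inC saw
    else if inC then aLoop rest inF inC saw
    else false

def is_figure_only_continuation_lines_py (lines : List String) : Bool :=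
  aLoop lines false false false

-- ===== PORT B =====
-- port of Source B: recursive descent over the pre-stripped token list; Source B's index loops become
-- structural recursion on the remaining suffix (exact: advancing the index = passing the suffix).
def parseCaption : List String → Option (List String)
  | [] => none
  | t :: rest => if t = "</figcaption>" then some rest else parseCaption rest

-- termination helper, cited by figBody's decreasing_by
theorem parseCaption_length : ∀ (xs r : List String), parseCaption xs = some r → r.length < xs.length := by
  intro xs
  induction xs with
  | nil => intro r h; simp [parseCaption] at h
  | cons t rest ih =>
    intro r h
    simp only [parseCaption] at h
    split at h
    · cases h; simp
    · exact Nat.lt_trans (ih r h) (by simp)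

def figBody : List String → Option (List String)
  | [] => none
  | t :: rest =>
    if t = "" ∨ PySem.Str.startswith t "<img" = true ∨ PySem.Str.startswith t "<figure" = true then
      figBody rest
    else if t = "<figcaption>" then
      match h : parseCaption rest with
      | none => none
      | some r => figBody r
    else if t = "</figure>" then some rest
    else none
termination_by xs => xs.length
decreasing_by
  · simp
  · exact Nat.lt_trans (parseCaption_length rest r h) (by simp)

-- termination helper, cited by bTop's decreasing_by
theorem figBody_length : ∀ (xs r : List String), figBody xs = some r → r.length < xs.length := by
  intro xs
  fun_induction figBody xs
  all_goals intro r h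
  · simp at h
  · rename_i ih
    exact Nat.lt_trans (ih r h) (by simp)
  · simp at h
  · rename_i rest r0 hpc _ ih
    exact Nat.lt_trans (Nat.lt_trans (ih r h) (parseCaption_length rest r0 hpc)) (by simp)
  · cases h; simp
  · simp at h

def bTop : List String → Bool → Bool
  | [], saw => saw
  | t :: rest, saw =>
    if t = "" then bTop rest saw
    else if PySem.Str.startswith t "<figure" = true then
      match h : figBody rest with
      | none => false
      | some r => bTop r true
    else false
termination_by xs _ => xs.length
decreasing_by
  · simp
  · exact Nat.lt_trans (figBody_length rest r h) (by simp)

def is_figure_only_continuation_lines_py_alt (lines : List String) : Bool :=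
  bTop (lines.map PySem.Str.strip) false

-- ===== PRECONDITION & SPEC =====
def Spec_is_figure_only_continuation_lines_py (lines : List String) (out : Bool) : Prop := out = is_figure_only_continuation_lines_py_alt lines
instance (lines : List String) (out : Bool) : Decidable (Spec_is_figure_only_continuation_lines_py lines out) := by unfold Spec_is_figure_only_continuation_lines_py; infer_instance

-- ===== CLAIM (what is proved, stated in full; the proofs are below) =====
def Claim_equal_is_figure_only_continuation_lines_py : Prop := ∀ (lines : List String), Dom_is_figure_only_continuation_lines_py lines → Spec_is_figure_only_continuation_lines_py lines (is_figure_only_continuation_lines_py lines)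

-- ===== LEMMAS AND PROOFS =====

-- B's three parser routines, packaged as the values A's three FSM states must produce
def Fb (ts : List String) : Bool :=
  match figBody ts with
  | none => false
  | some r => bTop r true

def Cb (ts : List String) : Bool :=
  match parseCaption ts with
  | none => false
  | some r => Fb r

-- one-step unfolding lemmas for B's routines
theorem bTop_nil (saw : Bool) : bTop [] saw = saw := by rw [bTop.eq_def]

theorem bTop_blank {t : String} (rest : List String) (saw : Bool) (h : t = "") :
    bTop (t :: rest) saw = bTop rest saw := by
  rw [bTop.eq_def]; simp [h]

theorem bTop_fig {t : String} (rest : List String) (saw : Bool)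
    (h1 : ¬ t = "") (h2 : PySem.Str.startswith t "<figure" = true) :
    bTop (t :: rest) saw = Fb rest := by
  rw [bTop.eq_def, Fb]
  simp only [if_neg h1, if_pos h2]
  cases figBody rest <;> rfl

theorem bTop_other {t : String} (rest : List String) (saw : Bool)
    (h1 : ¬ t = "") (h2 : ¬ PySem.Str.startswith t "<figure" = true) :
    bTop (t :: rest) saw = false := by
  rw [bTop.eq_def]; simp only [if_neg h1, if_neg h2]

theorem Fb_nil : Fb [] = false := by rw [Fb, figBody.eq_def]

theorem Fb_skip {t : String} (rest : List String)
    (h : t = "" ∨ PySem.Str.startswith t "<img" = true ∨ PySem.Str.startswith t "<figure" = true) :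
    Fb (t :: rest) = Fb rest := by
  rw [Fb, Fb, figBody.eq_def]
  simp only [if_pos h]

theorem Fb_cap {t : String} (rest : List String)
    (h1 : ¬ (t = "" ∨ PySem.Str.startswith t "<img" = true ∨ PySem.Str.startswith t "<figure" = true))
    (h2 : t = "<figcaption>") :
    Fb (t :: rest) = Cb rest := by
  rw [Fb, Cb, figBody.eq_def]
  simp only [if_neg h1, if_pos h2]
  cases parseCaption rest <;> rfl

theorem Fb_close {t : String} (rest : List String)
    (h1 : ¬ (t = "" ∨ PySem.Str.startswith t "<img" = true ∨ PySem.Str.startswith t "<figure" = true))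
    (h2 : ¬ t = "<figcaption>") (h3 : t = "</figure>") :
    Fb (t :: rest) = bTop rest true := by
  rw [Fb, figBody.eq_def]
  simp only [if_neg h1, if_neg h2, if_pos h3]

theorem Fb_other {t : String} (rest : List String)
    (h1 : ¬ (t = "" ∨ PySem.Str.startswith t "<img" = true ∨ PySem.Str.startswith t "<figure" = true))
    (h2 : ¬ t = "<figcaption>") (h3 : ¬ t = "</figure>") :
    Fb (t :: rest) = false := by
  rw [Fb, figBody.eq_def]
  simp only [if_neg h1, if_neg h2, if_neg h3]

theorem Cb_nil : Cb [] = false := by rw [Cb, parseCaption.eq_def]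

theorem Cb_close {t : String} (rest : List String) (h : t = "</figcaption>") :
    Cb (t :: rest) = Fb rest := by
  rw [Cb, parseCaption.eq_def]
  simp only [if_pos h]

theorem Cb_skip {t : String} (rest : List String) (h : ¬ t = "</figcaption>") :
    Cb (t :: rest) = Cb rest := by
  rw [Cb, Cb, parseCaption.eq_def]
  simp only [if_neg h]

-- A's three reachable FSM states each compute the corresponding parser routine of B
theorem main3 : ∀ (lines : List String),
    (∀ saw, aLoop lines false false saw = bTop (lines.map PySem.Str.strip) saw) ∧
    aLoop lines true false true = Fb (lines.map PySem.Str.strip) ∧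
    aLoop lines true true true = Cb (lines.map PySem.Str.strip) := by
  intro lines
  induction lines with
  | nil =>
    refine ⟨fun saw => ?_, ?_, ?_⟩
    · rw [List.map_nil, bTop_nil]; simp [aLoop]
    · rw [List.map_nil, Fb_nil]; simp [aLoop]
    · rw [List.map_nil, Cb_nil]; simp [aLoop]
  | cons line rest ih =>
    obtain ⟨ih0, ih1, ih2⟩ := ih
    set s := PySem.Str.strip line with hs
    refine ⟨fun saw => ?_, ?_, ?_⟩
    · -- state S0: outside any figure
      simp only [aLoop, ← hs, List.map_cons]
      by_cases h1 : s = ""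
      · rw [if_pos h1, bTop_blank _ _ h1]; exact ih0 saw
      · rw [if_neg h1]
        by_cases h2 : PySem.Str.startswith s "<figure" = true
        · rw [if_pos h2, bTop_fig _ _ h1 h2]; exact ih1
        · rw [if_neg h2, bTop_other _ _ h1 h2]
          simp only [Bool.and_false, Bool.false_and, Bool.false_eq_true, if_false]
    · -- state S1: inside a figure
      simp only [aLoop, ← hs, List.map_cons, Bool.and_true, Bool.and_false,
        Bool.not_false, Bool.false_eq_true, if_false]
      by_cases h1 : s = ""
      · rw [if_pos h1, Fb_skip _ (Or.inl h1)]; exact ih1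
      · rw [if_neg h1]
        by_cases h2 : PySem.Str.startswith s "<figure" = true
        · rw [if_pos h2, Fb_skip _ (Or.inr (Or.inr h2))]; exact ih1
        · rw [if_neg h2]
          by_cases h3 : PySem.Str.startswith s "<img" = true
          · rw [if_pos h3, Fb_skip _ (Or.inr (Or.inl h3))]; exact ih1
          · rw [if_neg h3]
            have hno : ¬ (s = "" ∨ PySem.Str.startswith s "<img" = true ∨
                PySem.Str.startswith s "<figure" = true) :=
              not_or.mpr ⟨h1, not_or.mpr ⟨h3, h2⟩⟩
            by_cases h4 : s = "<figcaption>"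
            · rw [if_pos (beq_iff_eq.mpr h4), Fb_cap _ hno h4]; exact ih2
            · rw [if_neg (by simp [h4])]
              by_cases h6 : s = "</figure>"
              · rw [if_pos (beq_iff_eq.mpr h6), Fb_close _ hno h4 h6]; exact ih0 true
              · rw [if_neg (by simp [h6]), Fb_other _ hno h4 h6]
    · -- state S2: inside a figcaption (everything but the closing tag is swallowed)
      simp only [aLoop, ← hs, List.map_cons, Bool.and_true, Bool.not_true, Bool.and_false,
        Bool.false_eq_true, if_false]
      by_cases hc : s = "</figcaption>"
      · have e0 : ¬ s = "" := by rw [hc]; decide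
        have e1 : ¬ PySem.Str.startswith s "<figure" = true := by rw [hc]; decide
        have e2 : ¬ PySem.Str.startswith s "<img" = true := by rw [hc]; decide
        have e3 : ¬ (s == "<figcaption>") = true := by rw [hc]; decide
        rw [if_neg e0, if_neg e1, if_neg e2, if_neg e3, if_pos (beq_iff_eq.mpr hc),
          Cb_close _ hc]
        exact ih1
      · rw [Cb_skip _ hc]
        split_ifs with g1 g2 g3 g4 g5 <;> first | exact ih2 | simp_all

-- ===== VERDICT (by name: the statement is the Claim_ definition above) =====
theorem is_figure_only_continuation_lines_py_spec : Claim_equal_is_figure_only_continuation_lines_py := by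
  intro lines _
  unfold Spec_is_figure_only_continuation_lines_py is_figure_only_continuation_lines_py is_figure_only_continuation_lines_py_alt
  exact (main3 lines).1 false
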